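-- pv_equiv track=rewrite | github.com/alfredronning/knowit_kalender | 2022/day18/solver.py | finn_grupper
-- ===== SOURCE A (Python) =====
-- def finn_grupper(bits):
--     grupper = []
--     toerpotens = 1
--     while toerpotens < len(bits):
--         current = []
--         i = 0
--         while i < len(bits):
--             i += toerpotens
--             current += bits[i:i+toerpotens]
--             i += toerpotens
--         grupper.append(sum(current) % 2 == 0)
--         toerpotens<<=1
--     return grupper
-- ===== SOURCE B (Python) =====
-- def finn_grupper(bits):
--     n = len(bits)
--     g = 0
--     while (1 << g) < n:
--         g += 1
--     return [sum(bits[i] for i in range(n) if i & (1 << k)) % 2 == 0 for k in range(g)]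
-- ===== Notes on version B (the rewrite author's own statement) =====
-- stated objective: alternative
-- what changed: Replaces A's doubling while-loop with manual index jumps and repeated list slicing by first computing the group count g in closed form and then, per bit k, a single comprehension that sums elements whose index has bit k set (a bit test replaces the slice bookkeeping).
import Mathlib
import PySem

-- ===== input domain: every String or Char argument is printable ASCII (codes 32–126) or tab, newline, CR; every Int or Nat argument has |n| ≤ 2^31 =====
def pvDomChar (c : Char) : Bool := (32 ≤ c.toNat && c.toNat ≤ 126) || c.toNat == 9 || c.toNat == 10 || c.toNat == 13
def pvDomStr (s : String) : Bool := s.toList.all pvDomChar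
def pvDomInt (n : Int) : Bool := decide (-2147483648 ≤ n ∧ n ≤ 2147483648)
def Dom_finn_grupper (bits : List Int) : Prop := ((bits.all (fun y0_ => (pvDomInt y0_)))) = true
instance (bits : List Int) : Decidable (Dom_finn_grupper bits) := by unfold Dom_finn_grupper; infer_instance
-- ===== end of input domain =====

-- B replaces A's doubling while-loop with index jumps and slicing by a closed-form group count
-- plus a per-bit index-bit-test comprehension (alternative decomposition, same asymptotic cost).

-- ===== PORT A =====
-- inner while loop of A: while i < len(bits): i += p; current += bits[i:i+p]; i += p
-- (the `1 ≤ p` guard only makes the recursion total; every call from the outer loop has p ≥ 1)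
def finnInner (bits : List Int) (p i : Int) (cur : List Int) : List Int :=
  if _h : 1 ≤ p ∧ i < (bits.length : Int) then
    finnInner bits p (i + p + p) (cur ++ PySem.List.slice bits (some (i + p)) (some (i + p + p)))
  else cur
termination_by ((bits.length : Int) - i).toNat
decreasing_by omega

-- outer while loop of A: while toerpotens < len(bits): … ; toerpotens <<= 1  (p <<= 1 is 2 * p, exact on Int)
def finnOuter (bits : List Int) (p : Int) (grupper : List Bool) : List Bool :=
  if _h : 1 ≤ p ∧ p < (bits.length : Int) then
    finnOuter bits (2 * p) (grupper ++ [PySem.Int.mod (finnInner bits p 0 []).sum 2 == 0])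
  else grupper
termination_by ((bits.length : Int) - p).toNat
decreasing_by omega

def finn_grupper (bits : List Int) : List Bool := finnOuter bits 1 []

-- ===== PORT B =====
-- while (1 << g) < n: g += 1   (1 << g is 2 ^ g, exact on Int for a nonnegative shift)
def finnGroups (n : Int) (g : Nat) : Nat :=
  if (2 : Int) ^ g < n then finnGroups n (g + 1) else g
termination_by (n - 2 ^ g).toNat
decreasing_by
  have h1 : (0 : Int) < 2 ^ g := by positivity
  have h2 : (2 : Int) ^ (g + 1) = 2 * 2 ^ g := by ring
  omega

-- [sum(bits[i] for i in range(n) if i & (1 << k)) % 2 == 0 for k in range(g)]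
def finn_grupper_alt (bits : List Int) : List Bool :=
  let n : Int := bits.length
  let g := finnGroups n 0
  (List.range g).map (fun k =>
    PySem.Int.mod (((PySem.List.pyRange 0 n 1).filter
        (fun i => Int.land i ((2 : Int) ^ k) != 0)).map
      (fun i => PySem.List.pyGetD bits i 0)).sum 2 == 0)

-- ===== PRECONDITION & SPEC =====
def Spec_finn_grupper (bits : List Int) (out : List Bool) : Prop := out = finn_grupper_alt bits
instance (bits : List Int) (out : List Bool) : Decidable (Spec_finn_grupper bits out) := by unfold Spec_finn_grupper; infer_instance

-- ===== CLAIM (what is proved, stated in full; the proofs are below) =====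
def Claim_equal_finn_grupper : Prop := ∀ (bits : List Int), Dom_finn_grupper bits → Spec_finn_grupper bits (finn_grupper bits)

-- ===== LEMMAS AND PROOFS =====

-- the elements at indices j ∈ [m, n) whose quotient j / P is odd (for P = 2^k: bit k of j set)
def specL (bits : List Int) (P m : Nat) : List Int :=
  ((List.range' m (bits.length - m)).filter (fun j => decide (j / P % 2 = 1))).map
    (fun j => bits.getD j 0)

theorem take_drop_map_range' (xs : List Int) (a t : Nat) :
    (xs.drop a).take t = (List.range' a (min t (xs.length - a))).map (fun j => xs.getD j 0) := by
  apply List.ext_getElem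
  · simp
  · intro i h1 h2
    simp only [List.getElem_take, List.getElem_drop, List.getElem_map, List.getElem_range']
    rw [List.getD_eq_getElem]
    · simp
    · simp at h2 ⊢; omega

theorem div_P_of_block (P t j r : Nat) (hP : 0 < P) (hj : j = r + t * P) (hr : r < P) :
    j / P = t := by
  subst hj
  rw [Nat.add_mul_div_right _ _ hP, Nat.div_eq_of_lt hr, Nat.zero_add]

theorem range'_split (s a b : Nat) :
    List.range' s (a + b) = List.range' s a ++ List.range' (s + a) b := by
  have := List.range'_append (s := s) (m := a) (n := b) (step := 1)
  simpa using this.symm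

-- one pass of A's inner loop eats the block [m, m+2P): it keeps exactly the slice [m+P, m+2P)
theorem specL_step (bits : List Int) (P m : Nat) (hP : 0 < P) (hm : 2 * P ∣ m)
    (hmn : m < bits.length) :
    (specL bits P m).sum
      = ((bits.drop (m + P)).take P).sum + (specL bits P (m + 2 * P)).sum := by
  obtain ⟨t, ht⟩ := hm
  obtain ⟨c, hc⟩ : ∃ c, c = min (2 * P) (bits.length - m) := ⟨_, rfl⟩
  obtain ⟨d, hd⟩ : ∃ d, d = min P (bits.length - m) := ⟨_, rfl⟩
  have hmP : 2 * t * P = m := by rw [ht]; ring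
  have hmP' : (2 * t + 1) * P = m + P := by rw [ht]; ring
  have esum : bits.length - m = c + (bits.length - m - c) := by omega
  have esum2 : c = d + (c - d) := by omega
  have hs1 : List.range' m (bits.length - m)
      = List.range' m c ++ List.range' (m + c) (bits.length - m - c) := by
    conv_lhs => rw [esum, range'_split]
  have hs2 : List.range' m c = List.range' m d ++ List.range' (m + d) (c - d) := by
    conv_lhs => rw [esum2, range'_split]
  have hsplit : List.range' m (bits.length - m)
      = List.range' m d ++ List.range' (m + d) (c - d)
        ++ List.range' (m + c) (bits.length - m - c) := by
    rw [hs1, hs2]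
  have hdiv1 : ∀ j, m ≤ j → j < m + P → j / P = 2 * t := by
    intro j h1 h2
    exact div_P_of_block P (2 * t) j (j - m) hP (by omega) (by omega)
  have hdiv2 : ∀ j, m + P ≤ j → j < m + 2 * P → j / P = 2 * t + 1 := by
    intro j h1 h2
    exact div_P_of_block P (2 * t + 1) j (j - m - P) hP (by omega) (by omega)
  have hf1 : (List.range' m d).filter (fun j => decide (j / P % 2 = 1)) = [] := by
    rw [List.filter_eq_nil_iff]
    intro j hj
    rw [List.mem_range'_1] at hj
    have := hdiv1 j (by omega) (by omega)
    simp [this, Nat.mul_mod_right]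
  have hf2 : (List.range' (m + d) (c - d)).filter (fun j => decide (j / P % 2 = 1))
      = List.range' (m + d) (c - d) := by
    rw [List.filter_eq_self]
    intro j hj
    rw [List.mem_range'_1] at hj
    have := hdiv2 j (by omega) (by omega)
    simp [this]
  have hslice : (bits.drop (m + P)).take P
      = (List.range' (m + d) (c - d)).map (fun j => bits.getD j 0) := by
    rw [take_drop_map_range']
    by_cases hcase : P ≤ bits.length - m
    · rw [show min P (bits.length - (m + P)) = c - d by omega]
      rw [show m + P = m + d by omega]
    · have e1 : min P (bits.length - (m + P)) = 0 := by omega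
      have e2 : c - d = 0 := by omega
      rw [e1, e2, List.range'_zero, List.range'_zero]
  have hlast : specL bits P (m + 2 * P)
      = ((List.range' (m + c) (bits.length - m - c)).filter
          (fun j => decide (j / P % 2 = 1))).map (fun j => bits.getD j 0) := by
    unfold specL
    by_cases hcase : 2 * P ≤ bits.length - m
    · have e2 : bits.length - (m + 2 * P) = bits.length - m - c := by omega
      have e1 : m + 2 * P = m + c := by omega
      rw [e2, e1]
    · have e1 : bits.length - (m + 2 * P) = 0 := by omega
      have e2 : bits.length - m - c = 0 := by omega
      rw [e1, e2, List.range'_zero, List.range'_zero]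
  rw [hslice, hlast]
  unfold specL
  rw [hsplit, List.filter_append, List.filter_append, List.map_append, List.map_append,
    List.sum_append, List.sum_append, hf1, hf2]
  simp

theorem specL_nil (bits : List Int) (P m : Nat) (h : bits.length ≤ m) :
    specL bits P m = [] := by
  unfold specL
  rw [show bits.length - m = 0 by omega, List.range'_zero]
  simp

theorem finn_inner_sum (bits : List Int) (p i : Int) (cur : List Int)
    (hp : 1 ≤ p) (hi : 0 ≤ i) (hd : 2 * p.toNat ∣ i.toNat) :
    (finnInner bits p i cur).sum = cur.sum + (specL bits p.toNat i.toNat).sum := by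
  induction i, cur using finnInner.induct bits p with
  | case1 i cur h ih =>
    rw [finnInner, dif_pos h]
    have hP : 0 < p.toNat := by omega
    have hi2 : (0:Int) ≤ i + p + p := by omega
    have hd2 : 2 * p.toNat ∣ (i + p + p).toNat := by
      obtain ⟨t, ht⟩ := hd
      refine ⟨t + 1, ?_⟩
      have : 2 * p.toNat * (t + 1) = 2 * p.toNat * t + 2 * p.toNat := by ring
      omega
    rw [ih hi2 hd2]
    have hcast1 : i + p = ((i.toNat + p.toNat : Nat) : Int) := by push_cast; omega
    have hcast2 : i + p + p = ((i.toNat + p.toNat : Nat) : Int) + (p.toNat : Int) := by push_cast; omega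
    rw [hcast2, hcast1, PySem.List.slice_natCast_add]
    have hstep := specL_step bits p.toNat i.toNat hP hd (by omega)
    rw [List.sum_append, hstep]
    rw [show (((i.toNat + p.toNat : Nat) : Int) + (p.toNat : Int)).toNat
        = i.toNat + 2 * p.toNat by omega]
    ring
  | case2 i cur h =>
    rw [finnInner, dif_neg h]
    rw [specL_nil bits p.toNat i.toNat (by omega)]
    simp

-- B's entry for bit k, written exactly as finn_grupper_alt computes it
def fAlt (bits : List Int) (k : Nat) : Bool :=
  PySem.Int.mod (((PySem.List.pyRange 0 (bits.length : Int) 1).filter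
      (fun i => Int.land i ((2 : Int) ^ k) != 0)).map
    (fun i => PySem.List.pyGetD bits i 0)).sum 2 == 0

-- proof-side tail of the output list from bit k on
def tailB (bits : List Int) (k : Nat) : List Bool :=
  if (2 : Int) ^ k < (bits.length : Int) then fAlt bits k :: tailB bits (k + 1) else []
termination_by ((bits.length : Int) - 2 ^ k).toNat
decreasing_by
  have h1 : (0 : Int) < 2 ^ k := by positivity
  have h2 : (2 : Int) ^ (k + 1) = 2 * 2 ^ k := by ring
  omega

-- the bit test i & (1 << k) ≠ 0 is the parity test (i / 2^k) % 2 = 1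
theorem fAlt_eq_spec (bits : List Int) (k : Nat) :
    fAlt bits k = (PySem.Int.mod (specL bits (2 ^ k) 0).sum 2 == 0) := by
  unfold fAlt specL
  congr 2
  rw [show ((2 : Int) ^ k) = ((2 ^ k : Nat) : Int) by push_cast; ring]
  rw [PySem.List.pyRange_zero_nat, List.filter_map, List.map_map]
  have hpred : ((fun i => Int.land i ((2 ^ k : Nat) : Int) != 0) ∘ fun j : Nat => (j : Int))
      = fun j : Nat => decide (j / 2 ^ k % 2 = 1) := by
    funext j
    have hland : Int.land (j : Int) ((2 ^ k : Nat) : Int) = ((j &&& 2 ^ k : Nat) : Int) := rfl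
    simp only [Function.comp, hland, Nat.and_two_pow]
    rcases h : j.testBit k with hf | ht
    · have := Nat.testBit_eq_decide_div_mod_eq (x := j) (i := k)
      rw [h] at this
      simp [← this]
    · have := Nat.testBit_eq_decide_div_mod_eq (x := j) (i := k)
      rw [h] at this
      simp [← this]
  rw [hpred]
  rw [List.range_eq_range']
  simp only [Nat.sub_zero]
  congr 1
  apply List.map_congr_left
  intro j hj
  simp [PySem.List.pyGetD_natCast]

theorem outer_eq (bits : List Int) (k : Nat) :
    ∀ acc : List Bool, finnOuter bits ((2 : Int) ^ k) acc = acc ++ tailB bits k := by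
  induction k using tailB.induct bits with
  | case1 k h ih =>
    intro acc
    have hpos : (0 : Int) < 2 ^ k := by positivity
    rw [finnOuter, dif_pos ⟨by omega, h⟩]
    rw [show (2 : Int) * 2 ^ k = 2 ^ (k + 1) by ring]
    rw [ih]
    have hentry : (PySem.Int.mod (finnInner bits ((2 : Int) ^ k) 0 []).sum 2 == 0) = fAlt bits k := by
      rw [finn_inner_sum bits ((2 : Int) ^ k) 0 [] (by omega) le_rfl (by simp)]
      rw [show ((2 : Int) ^ k).toNat = 2 ^ k by
        rw [show ((2 : Int) ^ k) = ((2 ^ k : Nat) : Int) by push_cast; ring, Int.toNat_natCast]]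
      rw [fAlt_eq_spec]
      simp
    rw [hentry]
    conv_rhs => rw [tailB, if_pos h]
    simp
  | case2 k h =>
    intro acc
    rw [finnOuter, dif_neg (by intro hc; exact h hc.2)]
    rw [tailB, if_neg h]
    simp

theorem groups_ge (n : Int) (k : Nat) : k ≤ finnGroups n k := by
  induction k using finnGroups.induct n with
  | case1 k h ih =>
    rw [finnGroups, if_pos h]
    omega
  | case2 k h =>
    rw [finnGroups, if_neg h]

theorem tailB_eq_range (bits : List Int) (k : Nat) :
    tailB bits k
      = (List.range' k (finnGroups (bits.length : Int) k - k)).map (fAlt bits) := by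
  induction k using tailB.induct bits with
  | case1 k h ih =>
    rw [tailB, if_pos h]
    rw [show finnGroups (bits.length : Int) k = finnGroups (bits.length : Int) (k + 1) from by
      rw [finnGroups, if_pos h]]
    have hge := groups_ge (bits.length : Int) (k + 1)
    rw [show finnGroups (bits.length : Int) (k + 1) - k
        = (finnGroups (bits.length : Int) (k + 1) - (k + 1)) + 1 by omega, List.range'_succ]
    simp only [List.map_cons]
    rw [ih]
  | case2 k h =>
    rw [tailB, if_neg h, finnGroups, if_neg h]
    simp

-- ===== VERDICT (by name: the statement is the Claim_ definition above) =====
theorem finn_grupper_spec : Claim_equal_finn_grupper := by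
  intro bits _
  show finn_grupper bits = finn_grupper_alt bits
  have hA : finn_grupper bits = tailB bits 0 := by
    have := outer_eq bits 0 []
    simpa [finn_grupper] using this
  have hB : finn_grupper_alt bits = (List.range (finnGroups (bits.length : Int) 0)).map (fAlt bits) := rfl
  rw [hA, hB, tailB_eq_range, List.range_eq_range']
  simp
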